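-- pv_equiv track=rewrite | github.com/chenye95/LeetCode_Progress | 1883_MinSkipsArriveOnTime.py | min_skips_two_list
-- ===== SOURCE A (Python) =====
-- from typing import List
--
-- def min_skips_two_list(distance: List[int], speed: int, hours_before: int) -> int:
--     """
--     :param distance: 1 <= len(distance) <= 1000, 1 <= distance[i] <= 1e5
--     :param speed: 1 <= speed <= 1e6
--     :param hours_before: 1 <= hours_before <= 1e7
--     :return: minimum skips to arrive at the meeting on time
--     """
--     # Scale all times by speed to avoid float
--     n = len(distance)
--     # previous_road[max_skips] minimum time to reach road_i with at most max_skips, scale up by speed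
--     previous_road: List[int] = [speed * hours_before] * (n + 1)
--     previous_road[0] = 0
--
--     # road_i is 1 indexed
--     for road_i, distance_i in enumerate(distance, 1):
--         current_road: List[int] = [speed * hours_before] * (n + 1)
--         current_road[0] = (previous_road[0] + distance_i + speed - 1) // speed * speed
--         for skip_count in range(1, road_i + 1):
--             current_road[skip_count] = min(previous_road[skip_count - 1] + distance_i,
--                                            (previous_road[skip_count] + distance_i + speed - 1) // speed * speed)
--         previous_road = current_road
--
--     for skip_count, time_to_arrive in enumerate(previous_road):
--         if time_to_arrive <= hours_before * speed:
--             return skip_count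
--
--     return -1
-- ===== SOURCE B (Python) =====
-- from typing import List
--
-- def min_skips_two_list(distance: List[int], speed: int, hours_before: int) -> int:
--     # Column-by-column DP over the skip budget with early exit: compute the
--     # best scaled times for budget k only if budget k-1 was not enough.
--     S = speed * hours_before
--     n = len(distance)
--     # budget 0: rest (round up to a multiple of speed) after every road
--     col = [0]
--     for d in distance:
--         col.append((col[-1] + d + speed - 1) // speed * speed)
--     for k in range(n + 1):
--         if k > 0:
--             new = [S] * k  # fewer roads than skips: unreachable state
--             for i in range(k, n + 1):
--                 d = distance[i - 1]
--                 new.append(min(col[i - 1] + d,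
--                                (new[-1] + d + speed - 1) // speed * speed))
--             col = new
--         if col[n] <= S:
--             return k
--     return -1
-- ===== Notes on version B (the rewrite author's own statement) =====
-- stated objective: faster
-- what changed: B transposes the DP: instead of A's full row-per-road table followed by a scan, it computes one skip-budget column at a time (budget-0 prefix sums first, each next budget from the previous column) and returns at the first budget whose final entry meets the deadline, so columns for larger budgets are never built.
import Mathlib
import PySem

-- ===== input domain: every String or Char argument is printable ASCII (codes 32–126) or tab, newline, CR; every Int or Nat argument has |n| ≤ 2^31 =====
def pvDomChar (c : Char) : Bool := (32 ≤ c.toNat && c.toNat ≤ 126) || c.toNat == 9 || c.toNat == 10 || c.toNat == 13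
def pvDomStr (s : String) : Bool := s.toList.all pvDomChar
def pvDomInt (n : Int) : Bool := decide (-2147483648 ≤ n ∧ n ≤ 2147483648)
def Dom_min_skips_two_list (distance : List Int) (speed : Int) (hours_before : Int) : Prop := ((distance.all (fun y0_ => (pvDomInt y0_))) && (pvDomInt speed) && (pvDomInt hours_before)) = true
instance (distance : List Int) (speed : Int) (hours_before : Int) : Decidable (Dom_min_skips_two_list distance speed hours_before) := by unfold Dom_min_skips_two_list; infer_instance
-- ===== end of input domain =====

-- B changes the DP traversal: one skip-budget COLUMN at a time with an early exit at
-- the first sufficient budget, instead of A's row-per-road full table plus final scan.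

-- ===== PORT A =====
-- (x + speed - 1) // speed * speed, the scaled-integer ceiling both Pythons write
def pvCeil (speed x : Int) : Int := PySem.Int.floordiv (x + speed - 1) speed * speed

-- A's final scan: first index with time ≤ bound, else -1
def pvScanA (bound : Int) : List Int → Int → Int
  | [], _ => -1
  | t :: ts, k => if t ≤ bound then k else pvScanA bound ts (k + 1)

def min_skips_two_list (distance : List Int) (speed : Int) (hours_before : Int) : Int :=
  let n := distance.length
  let previous_road := (List.replicate (n + 1) (speed * hours_before)).set 0 0
  let final := (PySem.List.enumerate distance 1).foldl
    (fun previous_road rd =>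
      let road_i := rd.1
      let distance_i := rd.2
      let current_road := (List.replicate (n + 1) (speed * hours_before)).set 0
        (pvCeil speed (PySem.List.pyGetD previous_road 0 0 + distance_i))
      (PySem.List.pyRange 1 (road_i + 1) 1).foldl
        (fun current_road skip_count =>
          current_road.set skip_count.toNat
            (min (PySem.List.pyGetD previous_road (skip_count - 1) 0 + distance_i)
                 (pvCeil speed (PySem.List.pyGetD previous_road skip_count 0 + distance_i))))
        current_road)
    previous_road
  pvScanA (hours_before * speed) final 0

-- ===== PORT B =====
-- column for budget k, built from the column `col` for budget k-1
def pvColB (distance : List Int) (speed S : Int) (n k : Nat) (col : List Int) : List Int :=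
  (PySem.List.pyRange (k : Int) ((n : Int) + 1) 1).foldl
    (fun nc i =>
      let d := PySem.List.pyGetD distance (i - 1) 0
      nc ++ [min (PySem.List.pyGetD col (i - 1) 0 + d)
                 (pvCeil speed (nc.getLastD 0 + d))])
    (List.replicate k S)

-- the `for k in range(n + 1)` loop with its early return
def pvLoopB (distance : List Int) (speed S : Int) (n : Nat) : Nat → List Int → Int
  | k, col =>
    if k ≤ n then
      let col' := if k = 0 then col else pvColB distance speed S n k col
      if PySem.List.pyGetD col' (n : Int) 0 ≤ S then (k : Int)
      else pvLoopB distance speed S n (k + 1) col'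
    else -1
  termination_by k _ => n + 1 - k

def min_skips_two_list_alt (distance : List Int) (speed : Int) (hours_before : Int) : Int :=
  let S := speed * hours_before
  let n := distance.length
  let col := distance.foldl
    (fun col d => col ++ [pvCeil speed (col.getLastD 0 + d)]) [0]
  pvLoopB distance speed S n 0 col

-- ===== PRECONDITION & SPEC =====
-- Pre_ excludes exactly the inputs where Python A raises ZeroDivisionError:
-- speed = 0 with a nonempty distance list (no division runs when distance = []).
def Pre_min_skips_two_list (distance : List Int) (speed : Int) (hours_before : Int) : Prop :=
  distance = [] ∨ speed ≠ 0

instance (distance : List Int) (speed : Int) (hours_before : Int) : Decidable (Pre_min_skips_two_list distance speed hours_before) := by unfold Pre_min_skips_two_list; infer_instance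

def pvWitness_min_skips_two_list : List Int × Int × Int := ([1, 3, 2], 2, 3)

def Spec_min_skips_two_list (distance : List Int) (speed : Int) (hours_before : Int) (out : Int) : Prop := out = min_skips_two_list_alt distance speed hours_before
instance (distance : List Int) (speed : Int) (hours_before : Int) (out : Int) : Decidable (Spec_min_skips_two_list distance speed hours_before out) := by unfold Spec_min_skips_two_list; infer_instance

-- ===== CLAIM (what is proved, stated in full; the proofs are below) =====
def Claim_equal_min_skips_two_list : Prop := ∀ (distance : List Int) (speed : Int) (hours_before : Int), Dom_min_skips_two_list distance speed hours_before → Pre_min_skips_two_list distance speed hours_before → Spec_min_skips_two_list distance speed hours_before (min_skips_two_list distance speed hours_before)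

-- ===== LEMMAS AND PROOFS =====

-- the common DP value: gRef ds speed S i k = table entry after the first i roads with
-- skip count k; A's sentinel S fills the cells k > i that neither loop ever computes
def gRef (ds : List Int) (speed S : Int) : Nat → Nat → Int
  | 0, 0 => 0
  | 0, _ + 1 => S
  | i + 1, 0 => pvCeil speed (gRef ds speed S i 0 + ds.getD i 0)
  | i + 1, k + 1 =>
      if i + 1 < k + 1 then S
      else min (gRef ds speed S i k + ds.getD i 0)
               (pvCeil speed (gRef ds speed S i (k + 1) + ds.getD i 0))

-- the row after processing i roads (A's previous_road) and the column for budget k (B's col)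
def pvRow (ds : List Int) (speed S : Int) (i : Nat) : List Int :=
  (List.range (ds.length + 1)).map (fun k => gRef ds speed S i k)
def pvCol (ds : List Int) (speed S : Int) (k : Nat) : List Int :=
  (List.range (ds.length + 1)).map (fun j => gRef ds speed S j k)

-- A's per-road body, named so the lemmas can speak about it
def pvStepA (ds : List Int) (speed hb : Int) (previous_road : List Int) (rd : Int × Int) : List Int :=
  let road_i := rd.1
  let distance_i := rd.2
  let current_road := (List.replicate (ds.length + 1) (speed * hb)).set 0
    (pvCeil speed (PySem.List.pyGetD previous_road 0 0 + distance_i))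
  (PySem.List.pyRange 1 (road_i + 1) 1).foldl
    (fun current_road skip_count =>
      current_road.set skip_count.toNat
        (min (PySem.List.pyGetD previous_road (skip_count - 1) 0 + distance_i)
             (pvCeil speed (PySem.List.pyGetD previous_road skip_count 0 + distance_i))))
    current_road

theorem gRef_sentinel (ds : List Int) (speed S : Int) :
    ∀ i k, i < k → gRef ds speed S i k = S := by
  intro i
  induction i with
  | zero =>
    intro k hk
    cases k with
    | zero => omega
    | succ k => simp [gRef]
  | succ i ih =>
    intro k hk
    cases k with
    | zero => omega
    | succ k => simp [gRef, hk]

theorem pvSetFold_length (v : Int → Int) :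
    ∀ (r : List Int) (cur : List Int),
      (r.foldl (fun c k => c.set k.toNat (v k)) cur).length = cur.length := by
  intro r
  induction r with
  | nil => intro cur; rfl
  | cons a r ih => intro cur; simp [List.foldl_cons, ih, List.length_set]

theorem pvSetFold_getElem? (v : Int → Int) :
    ∀ (j : Nat) (cur : List Int) (m : Nat),
      ((PySem.List.pyRange 1 ((j : Int) + 1) 1).foldl
          (fun c k => c.set k.toNat (v k)) cur)[m]? =
        if 1 ≤ m ∧ m ≤ j then (if m < cur.length then some (v (m : Int)) else none)
        else cur[m]? := by
  intro j
  induction j with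
  | zero =>
    intro cur m
    rw [PySem.List.pyRange_one_eq_nil (by norm_num)]
    simp only [List.foldl_nil]
    have : ¬ (1 ≤ m ∧ m ≤ 0) := by omega
    rw [if_neg this]
  | succ j ih =>
    intro cur m
    have hcast : ((j + 1 : Nat) : Int) + 1 = ((j : Int) + 1) + 1 := by push_cast; ring
    rw [hcast, PySem.List.pyRange_one_succ_right (by omega), List.foldl_append]
    simp only [List.foldl_cons, List.foldl_nil]
    have htn : ((j : Int) + 1).toNat = j + 1 := by omega
    rw [htn, List.getElem?_set, pvSetFold_length, ih]
    by_cases h1 : m = j + 1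
    · subst h1
      rw [if_pos rfl, if_pos (show 1 ≤ j + 1 ∧ j + 1 ≤ j + 1 by omega)]
      have hc : ((j : Int) + 1) = ((j + 1 : Nat) : Int) := by push_cast; ring
      rw [hc]
    · by_cases h2 : 1 ≤ m ∧ m ≤ j
      · have h3 : 1 ≤ m ∧ m ≤ j + 1 := by omega
        simp [h2, h3, Ne.symm h1]
      · have h3 : ¬ (1 ≤ m ∧ m ≤ j + 1) := by omega
        simp [h2, h3, Ne.symm h1]

theorem pvRow_getElem? (ds : List Int) (speed S : Int) (i m : Nat) :
    (pvRow ds speed S i)[m]? =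
      if m < ds.length + 1 then some (gRef ds speed S i m) else none := by
  rw [pvRow]
  by_cases h : m < ds.length + 1 <;> simp [h]

theorem pvRowStep (ds : List Int) (speed hb : Int) (i : Nat) (hi : i < ds.length) :
    pvStepA ds speed hb (pvRow ds speed (speed * hb) i) ((i : Int) + 1, ds.getD i 0)
      = pvRow ds speed (speed * hb) (i + 1) := by
  apply List.ext_getElem?
  intro m
  unfold pvStepA
  simp only []
  have hcast : ((i : Int) + 1) + 1 = ((i + 1 : Nat) : Int) + 1 := by push_cast; ring
  rw [hcast, pvSetFold_getElem? _ (i + 1), pvRow_getElem?]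
  simp only [List.length_set, List.length_replicate]
  have hget0 : PySem.List.pyGetD (pvRow ds speed (speed * hb) i) 0 0
      = gRef ds speed (speed * hb) i 0 := by
    rw [PySem.List.pyGetD_zero, pvRow, PySem.List.getD_map_range _ _ _ _ (by omega)]
  by_cases hm1 : 1 ≤ m ∧ m ≤ i + 1
  · have hmn : m < ds.length + 1 := by omega
    rw [if_pos hm1, if_pos (by omega), if_pos hmn]
    obtain ⟨m', rfl⟩ : ∃ m', m = m' + 1 := ⟨m - 1, by omega⟩
    have hc1 : ((m' + 1 : Nat) : Int) - 1 = (m' : Nat) := by push_cast; ring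
    rw [hc1, PySem.List.pyGetD_natCast, PySem.List.pyGetD_natCast, pvRow,
      PySem.List.getD_map_range _ _ _ _ (by omega), PySem.List.getD_map_range _ _ _ _ (by omega)]
    have hnot : ¬ (i + 1 < m' + 1) := by omega
    simp [gRef, hnot]
  · rw [if_neg hm1, List.getElem?_set]
    by_cases hm0 : m = 0
    · subst hm0
      rw [if_pos rfl, if_pos (by simp), if_pos (by omega), hget0]
      simp [gRef]
    · rw [if_neg (fun h => hm0 h.symm), List.getElem?_replicate]
      by_cases hmn : m < ds.length + 1
      · rw [if_pos hmn, if_pos hmn, gRef_sentinel ds speed (speed * hb) (i + 1) m (by omega)]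
      · rw [if_neg hmn, if_neg hmn]

theorem pvRowFold (ds : List Int) (speed hb : Int) :
    ∀ (j i : Nat), i + j = ds.length →
      (PySem.List.enumerate (ds.drop i) ((i : Int) + 1)).foldl (pvStepA ds speed hb)
          (pvRow ds speed (speed * hb) i)
        = pvRow ds speed (speed * hb) ds.length := by
  intro j
  induction j with
  | zero =>
    intro i h
    rw [List.drop_of_length_le (by omega)]
    simp only [PySem.List.enumerate, List.foldl_nil]
    rw [show i = ds.length by omega]
  | succ j ih =>
    intro i h
    have hi : i < ds.length := by omega
    rw [List.drop_eq_getElem_cons hi, PySem.List.enumerate_cons, List.foldl_cons,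
      show ds[i] = ds.getD i 0 from (List.getD_eq_getElem ds 0 hi).symm,
      pvRowStep ds speed hb i hi,
      show (i : Int) + 1 + 1 = ((i + 1 : Nat) : Int) + 1 by push_cast; ring]
    exact ih (i + 1) (by omega)

theorem pvA_eq (ds : List Int) (speed hb : Int) :
    min_skips_two_list ds speed hb
      = pvScanA (hb * speed) (pvRow ds speed (speed * hb) ds.length) 0 := by
  have h0 : min_skips_two_list ds speed hb
      = pvScanA (hb * speed)
          ((PySem.List.enumerate ds 1).foldl (pvStepA ds speed hb)
            ((List.replicate (ds.length + 1) (speed * hb)).set 0 0)) 0 := rfl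
  have hinit : (List.replicate (ds.length + 1) (speed * hb)).set 0 0
      = pvRow ds speed (speed * hb) 0 := by
    apply List.ext_getElem?
    intro m
    rw [pvRow_getElem?, List.getElem?_set]
    by_cases hm0 : m = 0
    · subst hm0; simp [gRef]
    · rw [if_neg (fun h => hm0 h.symm), List.getElem?_replicate]
      by_cases hmn : m < ds.length + 1
      · rw [if_pos hmn, if_pos hmn,
          gRef_sentinel ds speed (speed * hb) 0 m (by omega)]
      · rw [if_neg hmn, if_neg hmn]
  have := pvRowFold ds speed hb ds.length 0 (by omega)
  simp only [List.drop_zero, Nat.cast_zero, zero_add] at this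
  rw [h0, hinit, this]

-- ----- B side -----

theorem pvCol_getD (ds : List Int) (speed S : Int) (k j : Nat) (hj : j < ds.length + 1) :
    (pvCol ds speed S k).getD j 0 = gRef ds speed S j k := by
  rw [pvCol, PySem.List.getD_map_range _ _ _ _ hj]

theorem pvColB_inner (ds : List Int) (speed S : Int) (k : Nat) (hk1 : 1 ≤ k)
    (hkn : k ≤ ds.length) :
    ∀ (j i : Nat), k ≤ i → i + j = ds.length + 1 →
      ((PySem.List.pyRange (i : Int) ((ds.length : Int) + 1) 1).foldl
        (fun nc t =>
          let d := PySem.List.pyGetD ds (t - 1) 0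
          nc ++ [min (PySem.List.pyGetD (pvCol ds speed S (k - 1)) (t - 1) 0 + d)
                     (pvCeil speed (nc.getLastD 0 + d))])
        ((List.range i).map (fun jj => gRef ds speed S jj k)))
      = pvCol ds speed S k := by
  intro j
  induction j with
  | zero =>
    intro i hki h
    rw [PySem.List.pyRange_one_eq_nil (by omega)]
    simp only [List.foldl_nil]
    have : i = ds.length + 1 := by omega
    rw [this, pvCol]
  | succ j ih =>
    intro i hki h
    have hin : i ≤ ds.length := by omega
    rw [PySem.List.pyRange_one_cons (by omega), List.foldl_cons]
    obtain ⟨i', rfl⟩ : ∃ i', i = i' + 1 := ⟨i - 1, by omega⟩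
    obtain ⟨k', rfl⟩ : ∃ k', k = k' + 1 := ⟨k - 1, by omega⟩
    have hc1 : ((i' + 1 : Nat) : Int) - 1 = ((i' : Nat) : Int) := by push_cast; ring
    have hlast : ((List.range (i' + 1)).map (fun jj => gRef ds speed S jj (k' + 1))).getLastD 0
        = gRef ds speed S i' (k' + 1) := by
      rw [List.range_succ, List.map_append]
      exact List.getLastD_concat
    simp only [hc1, PySem.List.pyGetD_natCast, hlast]
    rw [pvCol_getD ds speed S ((k' + 1) - 1) i' (by omega)]
    have hval : min (gRef ds speed S i' ((k' + 1) - 1) + ds.getD i' 0)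
        (pvCeil speed (gRef ds speed S i' (k' + 1) + ds.getD i' 0))
        = gRef ds speed S (i' + 1) (k' + 1) := by
      have hnot : ¬ (i' + 1 < k' + 1) := by omega
      simp [gRef, hnot]
    rw [hval]
    have hacc : (List.range (i' + 1)).map (fun jj => gRef ds speed S jj (k' + 1))
        ++ [gRef ds speed S (i' + 1) (k' + 1)]
        = (List.range (i' + 1 + 1)).map (fun jj => gRef ds speed S jj (k' + 1)) := by
      simp [List.range_succ]
    rw [hacc, show ((i' + 1 : Nat) : Int) + 1 = ((i' + 1 + 1 : Nat) : Int) by push_cast; ring]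
    exact ih (i' + 1 + 1) (by omega) (by omega)

theorem pvColStep (ds : List Int) (speed S : Int) (k : Nat) (hk1 : 1 ≤ k)
    (hkn : k ≤ ds.length) :
    pvColB ds speed S ds.length k (pvCol ds speed S (k - 1)) = pvCol ds speed S k := by
  unfold pvColB
  have hrepl : List.replicate k S = (List.range k).map (fun jj => gRef ds speed S jj k) := by
    apply List.ext_getElem?
    intro m
    rw [List.getElem?_replicate]
    simp only [List.getElem?_map]
    by_cases hm : m < k
    · simp [hm, gRef_sentinel ds speed S m k hm]
    · simp [hm]
  rw [hrepl]
  exact pvColB_inner ds speed S k hk1 hkn (ds.length + 1 - k) k (le_refl k) (by omega)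

theorem pvCol_zero (ds : List Int) (speed S : Int) :
    ∀ (j i : Nat), i + j = ds.length →
      ((ds.drop i).foldl (fun col d => col ++ [pvCeil speed (col.getLastD 0 + d)])
        ((List.range (i + 1)).map (fun jj => gRef ds speed S jj 0)))
      = pvCol ds speed S 0 := by
  intro j
  induction j with
  | zero =>
    intro i h
    rw [List.drop_of_length_le (by omega)]
    simp only [List.foldl_nil]
    rw [show i + 1 = ds.length + 1 by omega, pvCol]
  | succ j ih =>
    intro i h
    have hi : i < ds.length := by omega
    rw [List.drop_eq_getElem_cons hi, List.foldl_cons]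
    have hlast : ((List.range (i + 1)).map (fun jj => gRef ds speed S jj 0)).getLastD 0
        = gRef ds speed S i 0 := by
      rw [List.range_succ, List.map_append]
      exact List.getLastD_concat
    rw [hlast, show ds[i] = ds.getD i 0 from (List.getD_eq_getElem ds 0 hi).symm,
      show pvCeil speed (gRef ds speed S i 0 + ds.getD i 0) = gRef ds speed S (i + 1) 0 by
        simp [gRef],
      show (List.range (i + 1)).map (fun jj => gRef ds speed S jj 0)
          ++ [gRef ds speed S (i + 1) 0]
          = (List.range (i + 1 + 1)).map (fun jj => gRef ds speed S jj 0) by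
        simp [List.range_succ]]
    exact ih (i + 1) (by omega)

theorem pvLoop_eq (ds : List Int) (speed S : Int) :
    ∀ (m k : Nat), k ≤ ds.length + 1 → ds.length + 1 - k = m → ∀ col,
      col = pvCol ds speed S (k - 1) →
      pvLoopB ds speed S ds.length k col
        = pvScanA S ((pvRow ds speed S ds.length).drop k) (k : Int) := by
  intro m
  induction m with
  | zero =>
    intro k hk hm col hcol
    have hk' : k = ds.length + 1 := by omega
    rw [pvLoopB, if_neg (by omega)]
    rw [List.drop_of_length_le (by simp [pvRow]; omega)]
    rfl
  | succ m ih =>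
    intro k hk hm col hcol
    have hkn : k ≤ ds.length := by omega
    rw [pvLoopB, if_pos hkn]
    simp only []
    have hcol' : (if k = 0 then col else pvColB ds speed S ds.length k col)
        = pvCol ds speed S k := by
      by_cases hk0 : k = 0
      · subst hk0; rw [if_pos rfl, hcol]
      · rw [if_neg hk0, hcol]
        exact pvColStep ds speed S k (by omega) hkn
    rw [hcol', PySem.List.pyGetD_natCast, pvCol_getD ds speed S k ds.length (by omega)]
    have hdrop : (pvRow ds speed S ds.length).drop k
        = gRef ds speed S ds.length k :: (pvRow ds speed S ds.length).drop (k + 1) := by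
      have hklen : k < (pvRow ds speed S ds.length).length := by simp [pvRow]; omega
      rw [List.drop_eq_getElem_cons hklen]
      congr 1
      simp [pvRow]
    rw [hdrop, pvScanA]
    by_cases hle : gRef ds speed S ds.length k ≤ S
    · rw [if_pos hle, if_pos hle]
    · rw [if_neg hle, if_neg hle,
        show (k : Int) + 1 = ((k + 1 : Nat) : Int) by push_cast; ring]
      exact ih (k + 1) (by omega) (by omega) (pvCol ds speed S k)
        (by rw [show k + 1 - 1 = k by omega])

theorem pvB_eq (ds : List Int) (speed hb : Int) :
    min_skips_two_list_alt ds speed hb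
      = pvScanA (speed * hb) (pvRow ds speed (speed * hb) ds.length) 0 := by
  have h0 : min_skips_two_list_alt ds speed hb
      = pvLoopB ds speed (speed * hb) ds.length 0
          (ds.foldl (fun col d => col ++ [pvCeil speed (col.getLastD 0 + d)]) [0]) := rfl
  have hcol0 : ds.foldl (fun col d => col ++ [pvCeil speed (col.getLastD 0 + d)]) [0]
      = pvCol ds speed (speed * hb) 0 := by
    have := pvCol_zero ds speed (speed * hb) ds.length 0 (by omega)
    simp only [List.drop_zero] at this
    rw [← this]
    congr 1
  rw [h0, hcol0]
  have := pvLoop_eq ds speed (speed * hb) (ds.length + 1) 0 (by omega) (by omega)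
    (pvCol ds speed (speed * hb) 0) rfl
  simpa using this

-- ===== VERDICT (by name: the statement is the Claim_ definition above) =====
theorem min_skips_two_list_spec : Claim_equal_min_skips_two_list := by
  intro distance speed hours_before _ _
  unfold Spec_min_skips_two_list
  rw [pvA_eq, pvB_eq, mul_comm hours_before speed]
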